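-- pv_equiv track=rewrite | github.com/shammochanda/unroll-repo | unroll_repo.py | is_image_audio_video
-- ===== SOURCE A (Python) =====
-- image_extensions = ['.tif', '.tiff', '.bmp', '.jpg',
--                     '.jpeg', '.gif', '.png', '.eps',
--                     '.raw', '.cr2', '.nef', '.orf',
--                     '.sr2', '.psd', '.xcf', '.ai',
--                     '.cdr', '.apng', '.avif', '.jfif',
--                     '.pjpeg', '.pjp', '.png', '.svg',
--                     '.webp', '.ico', '.cur']
--
-- video_extensions = ['.webm', '.mkv', '.flv', '.vob',
--                     '.ogv', '.ogg', '.drc', '.gifv',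
--                     '.mng', '.avi', '.mts', '.m2ts',
--                     '.ts', '.mov', '.qt', '.wmv',
--                     '.yuv', '.rm', '.rmvb', '.viv',
--                     '.asf', '.amv', '.mp4', '.m4p',
--                     '.m4v', '.mpg', '.mp2', '.mpeg',
--                     '.mpe', '.mpv', '.m2v', '.svi',
--                     '.3gp', '.3g2', '.mxf', '.roq',
--                     '.nsv', '.f4v', '.f4p', '.f4a',
--                     '.f4b']
--
-- audio_extensions = ['.aa', '.aac', '.aax', '.act',
--                     '.aiff', '.alac', '.amr', '.ape',
--                     '.au', '.awb', '.dss', '.dvf',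
--                     '.flac', '.gsm', '.iklax', '.ivs',
--                     '.m4a', '.m4b', '.mmf', '.movpkg',
--                     '.mp3', '.mpc', '.msv', '.nmf',
--                     '.ogg', '.oga', '.mogg', '.opus',
--                     '.ra', '.rm', '.raw', '.rf64',
--                     '.sln', '.tta', '.voc', '.vox',
--                     '.wav', '.wma', '.wv', '.webm',
--                     '.8svx', '.cda']
--
-- def is_image_audio_video(file_path_name):
--     for i_ext in image_extensions:
--         if file_path_name[0-len(i_ext):].lower() == i_ext:
--             return True
--     for v_ext in video_extensions:
--         if file_path_name[0-len(v_ext):].lower() == v_ext: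
--             return True
--     for a_ext in audio_extensions:
--         if file_path_name[0-len(a_ext):].lower() == a_ext:
--             return True
--     return False
-- ===== SOURCE B (Python) =====
-- # Single combined extension set + one rfind-based suffix extraction instead of three list scans.
-- MEDIA_EXTS = frozenset([
--     '.tif', '.tiff', '.bmp', '.jpg', '.jpeg', '.gif', '.png', '.eps',
--     '.raw', '.cr2', '.nef', '.orf', '.sr2', '.psd', '.xcf', '.ai',
--     '.cdr', '.apng', '.avif', '.jfif', '.pjpeg', '.pjp', '.svg',
--     '.webp', '.ico', '.cur',
--     '.webm', '.mkv', '.flv', '.vob', '.ogv', '.ogg', '.drc', '.gifv',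
--     '.mng', '.avi', '.mts', '.m2ts', '.ts', '.mov', '.qt', '.wmv',
--     '.yuv', '.rm', '.rmvb', '.viv', '.asf', '.amv', '.mp4', '.m4p',
--     '.m4v', '.mpg', '.mp2', '.mpeg', '.mpe', '.mpv', '.m2v', '.svi',
--     '.3gp', '.3g2', '.mxf', '.roq', '.nsv', '.f4v', '.f4p', '.f4a', '.f4b',
--     '.aa', '.aac', '.aax', '.act', '.aiff', '.alac', '.amr', '.ape',
--     '.au', '.awb', '.dss', '.dvf', '.flac', '.gsm', '.iklax', '.ivs',
--     '.m4a', '.m4b', '.mmf', '.movpkg', '.mp3', '.mpc', '.msv', '.nmf',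
--     '.oga', '.mogg', '.opus', '.ra', '.rf64', '.sln', '.tta', '.voc',
--     '.vox', '.wav', '.wma', '.wv', '.8svx', '.cda'])
--
-- def is_image_audio_video(file_path_name):
--     name = file_path_name.lower()
--     i = name.rfind('.')
--     return i != -1 and name[i:] in MEDIA_EXTS
-- ===== Notes on version B (the rewrite author's own statement) =====
-- stated objective: simpler
-- what changed: Replaces A's three sequential ~110-extension suffix-slice-and-compare scans with one lowercase pass, an rfind locating the last dot to extract the extension, and a single membership test in a prebuilt combined frozenset.
import Mathlib
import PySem

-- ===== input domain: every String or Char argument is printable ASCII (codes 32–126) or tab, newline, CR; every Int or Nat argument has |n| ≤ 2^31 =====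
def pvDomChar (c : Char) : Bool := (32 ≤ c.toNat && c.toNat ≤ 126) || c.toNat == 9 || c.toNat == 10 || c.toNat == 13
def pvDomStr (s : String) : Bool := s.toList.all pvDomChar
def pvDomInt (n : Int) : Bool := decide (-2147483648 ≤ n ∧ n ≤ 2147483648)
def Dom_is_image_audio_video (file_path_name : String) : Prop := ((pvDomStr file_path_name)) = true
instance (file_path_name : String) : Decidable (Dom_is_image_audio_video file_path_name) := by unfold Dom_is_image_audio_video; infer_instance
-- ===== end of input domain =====

-- B replaces A's three sequential suffix-scan loops by one lowercase + rfind('.') suffix extraction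
-- and a single membership test in one combined extension set (return value only; no side effects).

-- ===== PORT A =====
def pvImageExtensions : List String :=
  [".tif", ".tiff", ".bmp", ".jpg",
   ".jpeg", ".gif", ".png", ".eps",
   ".raw", ".cr2", ".nef", ".orf",
   ".sr2", ".psd", ".xcf", ".ai",
   ".cdr", ".apng", ".avif", ".jfif",
   ".pjpeg", ".pjp", ".png", ".svg",
   ".webp", ".ico", ".cur"]

def pvVideoExtensions : List String :=
  [".webm", ".mkv", ".flv", ".vob",
   ".ogv", ".ogg", ".drc", ".gifv",
   ".mng", ".avi", ".mts", ".m2ts",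
   ".ts", ".mov", ".qt", ".wmv",
   ".yuv", ".rm", ".rmvb", ".viv",
   ".asf", ".amv", ".mp4", ".m4p",
   ".m4v", ".mpg", ".mp2", ".mpeg",
   ".mpe", ".mpv", ".m2v", ".svi",
   ".3gp", ".3g2", ".mxf", ".roq",
   ".nsv", ".f4v", ".f4p", ".f4a",
   ".f4b"]

def pvAudioExtensions : List String :=
  [".aa", ".aac", ".aax", ".act",
   ".aiff", ".alac", ".amr", ".ape",
   ".au", ".awb", ".dss", ".dvf",
   ".flac", ".gsm", ".iklax", ".ivs",
   ".m4a", ".m4b", ".mmf", ".movpkg",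
   ".mp3", ".mpc", ".msv", ".nmf",
   ".ogg", ".oga", ".mogg", ".opus",
   ".ra", ".rm", ".raw", ".rf64",
   ".sln", ".tta", ".voc", ".vox",
   ".wav", ".wma", ".wv", ".webm",
   ".8svx", ".cda"]

-- the 'for ext in exts: if file_path_name[0-len(ext):].lower() == ext: return True' loop
def pvScanExts (exts : List String) (file_path_name : String) : Bool :=
  match exts with
  | [] => false
  | e :: rest =>
    if PySem.Str.lower (PySem.Str.slice file_path_name (some (0 - PySem.Str.len e)) none) == e
    then true
    else pvScanExts rest file_path_name

def is_image_audio_video (file_path_name : String) : Bool :=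
  if pvScanExts pvImageExtensions file_path_name then true
  else if pvScanExts pvVideoExtensions file_path_name then true
  else if pvScanExts pvAudioExtensions file_path_name then true
  else false

-- ===== PORT B =====
def pvMediaExtsList : List String :=
  [".tif", ".tiff", ".bmp", ".jpg", ".jpeg", ".gif", ".png", ".eps",
   ".raw", ".cr2", ".nef", ".orf", ".sr2", ".psd", ".xcf", ".ai",
   ".cdr", ".apng", ".avif", ".jfif", ".pjpeg", ".pjp", ".svg",
   ".webp", ".ico", ".cur",
   ".webm", ".mkv", ".flv", ".vob", ".ogv", ".ogg", ".drc", ".gifv",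
   ".mng", ".avi", ".mts", ".m2ts", ".ts", ".mov", ".qt", ".wmv",
   ".yuv", ".rm", ".rmvb", ".viv", ".asf", ".amv", ".mp4", ".m4p",
   ".m4v", ".mpg", ".mp2", ".mpeg", ".mpe", ".mpv", ".m2v", ".svi",
   ".3gp", ".3g2", ".mxf", ".roq", ".nsv", ".f4v", ".f4p", ".f4a", ".f4b",
   ".aa", ".aac", ".aax", ".act", ".aiff", ".alac", ".amr", ".ape",
   ".au", ".awb", ".dss", ".dvf", ".flac", ".gsm", ".iklax", ".ivs",
   ".m4a", ".m4b", ".mmf", ".movpkg", ".mp3", ".mpc", ".msv", ".nmf",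
   ".oga", ".mogg", ".opus", ".ra", ".rf64", ".sln", ".tta", ".voc",
   ".vox", ".wav", ".wma", ".wv", ".8svx", ".cda"]

def pvMediaExts : PySem.Set String := PySem.Set.ofList pvMediaExtsList

def is_image_audio_video_alt (file_path_name : String) : Bool :=
  let name := PySem.Str.lower file_path_name
  let i := PySem.Str.rfind name "."
  if i != -1 then PySem.Set.contains pvMediaExts (PySem.Str.slice name (some i) none)
  else false

-- ===== PRECONDITION & SPEC =====
def Spec_is_image_audio_video (file_path_name : String) (out : Bool) : Prop := out = is_image_audio_video_alt file_path_name
instance (file_path_name : String) (out : Bool) : Decidable (Spec_is_image_audio_video file_path_name out) := by unfold Spec_is_image_audio_video; infer_instance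

-- ===== CLAIM (what is proved, stated in full; the proofs are below) =====
def Claim_equal_is_image_audio_video : Prop := ∀ (file_path_name : String), Dom_is_image_audio_video file_path_name → Spec_is_image_audio_video file_path_name (is_image_audio_video file_path_name)

-- ===== LEMMAS AND PROOFS =====

def pvAllExts : List String := pvImageExtensions ++ pvVideoExtensions ++ pvAudioExtensions

-- every extension string is '.' followed by a dot-free tail
set_option maxRecDepth 40000 in
lemma pvExt_shape : ∀ e ∈ pvAllExts, ∃ t, e.toList = '.' :: t ∧ '.' ∉ t := by
  intro e he
  have hb : (pvAllExts.all fun e => match e.toList with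
      | [] => false
      | c :: t => c == '.' && !(t.contains '.')) = true := by decide
  have h2 := List.all_eq_true.mp hb e he
  cases h : e.toList with
  | nil => simp [h] at h2
  | cons c t =>
    simp [h] at h2
    exact ⟨t, by rw [h2.1], h2.2⟩

lemma pvExt_len : ∀ e ∈ pvAllExts, 0 < e.toList.length := by
  intro e he
  obtain ⟨t, het, -⟩ := pvExt_shape e he
  simp [het]

-- the two literal lists carry the same members
set_option maxRecDepth 40000 in
lemma pvMem_media_iff_all (x : String) : x ∈ pvMediaExtsList ↔ x ∈ pvAllExts :=
  ⟨fun h => (by decide : pvMediaExtsList ⊆ pvAllExts) h,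
   fun h => (by decide : pvAllExts ⊆ pvMediaExtsList) h⟩

-- one check of A's loop tests "lowered name ends with e"
lemma pvCheck_iff (e : String) (he : 0 < e.toList.length) (s : String) :
    (PySem.Str.lower (PySem.Str.slice s (some (0 - PySem.Str.len e)) none) == e) = true
      ↔ e.toList <:+ PySem.Chars.lower s.toList := by
  rw [beq_iff_eq, ← String.toList_inj]
  rw [PySem.Str.toList_lower, PySem.Str.toList_slice, PySem.Chars.slice_eq_listSlice]
  rw [PySem.Str.len_eq]
  have h0 : (0 : Int) - (e.toList.length : Int) = -(e.toList.length : Int) := by ring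
  rw [h0, PySem.List.slice_from_neg_natCast _ _ he]
  unfold PySem.Chars.lower
  rw [List.map_drop, List.suffix_iff_eq_drop, List.length_map]
  exact eq_comm

lemma pvScan_iff (exts : List String) (s : String) (h : ∀ e ∈ exts, 0 < e.toList.length) :
    pvScanExts exts s = true ↔ ∃ e ∈ exts, e.toList <:+ PySem.Chars.lower s.toList := by
  induction exts with
  | nil => simp [pvScanExts]
  | cons e rest ih =>
    by_cases hc :
        (PySem.Str.lower (PySem.Str.slice s (some (0 - PySem.Str.len e)) none) == e) = true
    · simp only [pvScanExts]
      rw [if_pos hc]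
      exact ⟨fun _ => ⟨e, List.mem_cons_self .., (pvCheck_iff e (h e (List.mem_cons_self ..)) s).mp hc⟩,
             fun _ => rfl⟩
    · simp only [pvScanExts]
      rw [if_neg hc, ih (fun x hx => h x (List.mem_cons_of_mem _ hx))]
      constructor
      · rintro ⟨x, hx, hs⟩; exact ⟨x, List.mem_cons_of_mem _ hx, hs⟩
      · rintro ⟨x, hx, hs⟩
        rcases List.mem_cons.mp hx with rfl | hx'
        · exact absurd ((pvCheck_iff x (h x (List.mem_cons_self ..)) s).mpr hs) hc
        · exact ⟨x, hx', hs⟩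

lemma pvA_iff (s : String) :
    is_image_audio_video s = true ↔ ∃ e ∈ pvAllExts, e.toList <:+ PySem.Chars.lower s.toList := by
  have hor : is_image_audio_video s =
      (pvScanExts pvImageExtensions s || pvScanExts pvVideoExtensions s ||
        pvScanExts pvAudioExtensions s) := by
    unfold is_image_audio_video
    cases pvScanExts pvImageExtensions s <;> cases pvScanExts pvVideoExtensions s <;>
      cases pvScanExts pvAudioExtensions s <;> rfl
  have h1 := pvScan_iff pvImageExtensions s
    (fun e he => pvExt_len e (by simp [pvAllExts]; exact Or.inl he))
  have h2 := pvScan_iff pvVideoExtensions s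
    (fun e he => pvExt_len e (by simp [pvAllExts]; exact Or.inr (Or.inl he)))
  have h3 := pvScan_iff pvAudioExtensions s
    (fun e he => pvExt_len e (by simp [pvAllExts]; exact Or.inr (Or.inr he)))
  rw [hor]
  simp only [Bool.or_eq_true, h1, h2, h3, pvAllExts, List.mem_append]
  constructor
  · rintro ((⟨e, he, hs⟩ | ⟨e, he, hs⟩) | ⟨e, he, hs⟩)
    · exact ⟨e, Or.inl (Or.inl he), hs⟩
    · exact ⟨e, Or.inl (Or.inr he), hs⟩
    · exact ⟨e, Or.inr he, hs⟩
  · rintro ⟨e, (he | he) | he, hs⟩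
    · exact Or.inl (Or.inl ⟨e, he, hs⟩)
    · exact Or.inl (Or.inr ⟨e, he, hs⟩)
    · exact Or.inr ⟨e, he, hs⟩

lemma pvGo_hit (l : List Char) (k : Nat) (h : ['.'] <+: l.drop k) :
    PySem.Chars.rfind.go l ['.'] k = (k : Int) := by
  cases k with
  | zero => simp [PySem.Chars.rfind.go]; simpa using h
  | succ j => simp [PySem.Chars.rfind.go]; intro hc; exact absurd h hc

lemma pvGo_skip (l : List Char) (k d : Nat)
    (h : ∀ i, k < i → i ≤ k + d → ¬ ['.'] <+: l.drop i) :
    PySem.Chars.rfind.go l ['.'] (k + d) = PySem.Chars.rfind.go l ['.'] k := by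
  induction d with
  | zero => rfl
  | succ m ih =>
    have hnot : ¬ ['.'] <+: l.drop (k + (m+1)) := h _ (by omega) (by omega)
    have hstep : PySem.Chars.rfind.go l ['.'] (k + (m+1)) = PySem.Chars.rfind.go l ['.'] (k + m) := by
      show PySem.Chars.rfind.go l ['.'] ((k + m) + 1) = _
      simp [PySem.Chars.rfind.go]
      intro hc
      exact absurd (by simpa using hc) (by simpa using hnot)
    rw [hstep, ih (fun i hi1 hi2 => h i hi1 (by omega))]

lemma pvGo_shape (l : List Char) (j : Nat) :
    PySem.Chars.rfind.go l ['.'] j = -1 ∨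
      ∃ k : Nat, PySem.Chars.rfind.go l ['.'] j = (k : Int) ∧ ['.'] <+: l.drop k := by
  induction j with
  | zero =>
    by_cases hc : ['.'] <+: l
    · right; exact ⟨0, by simp [PySem.Chars.rfind.go, hc], by simpa using hc⟩
    · left; simp [PySem.Chars.rfind.go, hc]
  | succ m ih =>
    by_cases hc : ['.'] <+: l.drop (m+1)
    · right; exact ⟨m+1, by simp [PySem.Chars.rfind.go, hc], hc⟩
    · have hstep : PySem.Chars.rfind.go l ['.'] (m+1) = PySem.Chars.rfind.go l ['.'] m := by
        simp [PySem.Chars.rfind.go]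
        intro hcc; exact absurd hcc hc
      rw [hstep]; exact ih

-- dropping past a list prefix (no matching Mathlib name found for this orientation)
lemma pvDrop_append (p q : List Char) (i : Nat) (h : p.length ≤ i) :
    (p ++ q).drop i = q.drop (i - p.length) := by
  induction p generalizing i with
  | nil => simp
  | cons a p ih =>
    cases i with
    | zero => simp at h
    | succ j => simpa using ih j (by simpa using h)

lemma pvSingleton_prefix (c : Char) (xs : List Char) (h : [c] <+: xs) : ∃ ys, xs = c :: ys := by
  cases xs with
  | nil => simp at h
  | cons a t => obtain ⟨u, hu⟩ := h; simp at hu; exact ⟨t, by rw [hu.1]⟩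

lemma pvRfind_concat (p t : List Char) (ht : '.' ∉ t) :
    PySem.Chars.rfind (p ++ '.' :: t) ['.'] = (p.length : Int) := by
  unfold PySem.Chars.rfind
  have hlen : (p ++ '.' :: t).length = p.length + (t.length + 1) := by simp
  rw [hlen]
  have hskip := pvGo_skip (p ++ '.' :: t) p.length (t.length + 1) (by
    intro i hi1 hi2 hpre
    have hd : (p ++ '.' :: t).drop i = t.drop (i - p.length - 1) := by
      rw [pvDrop_append p ('.' :: t) i (by omega)]
      have : i - p.length = (i - p.length - 1) + 1 := by omega
      rw [this]
      simp
    rw [hd] at hpre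
    obtain ⟨ys, hys⟩ := pvSingleton_prefix _ _ hpre
    have : '.' ∈ t.drop (i - p.length - 1) := by rw [hys]; exact List.mem_cons_self ..
    exact ht (List.mem_of_mem_drop this))
  rw [hskip]
  apply pvGo_hit
  rw [pvDrop_append p ('.' :: t) p.length le_rfl]
  simp

lemma pvB_iff (s : String) :
    is_image_audio_video_alt s = true ↔ ∃ e ∈ pvAllExts, e.toList <:+ PySem.Chars.lower s.toList := by
  have hunfold : is_image_audio_video_alt s =
      (if (PySem.Str.rfind (PySem.Str.lower s) "." != -1) = true
       then PySem.Set.contains pvMediaExts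
         (PySem.Str.slice (PySem.Str.lower s) (some (PySem.Str.rfind (PySem.Str.lower s) ".")) none)
       else false) := rfl
  rw [hunfold]
  have hdotstr : (".".toList : List Char) = ['.'] := rfl
  rw [PySem.Str.rfind_eq, PySem.Str.toList_lower, hdotstr]
  set l := PySem.Chars.lower s.toList with hl
  have hrfind : PySem.Chars.rfind l ['.'] = PySem.Chars.rfind.go l ['.'] l.length := rfl
  constructor
  · intro hB
    rcases pvGo_shape l l.length with hneg | ⟨k, hk, -⟩
    · rw [hrfind, hneg] at hB; simp at hB
    · rw [hrfind, hk] at hB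
      have hne : ((k : Int) != -1) = true := by simp [bne_iff_ne]
      rw [hne, if_pos rfl] at hB
      have hmem : PySem.Str.slice (PySem.Str.lower s) (some (k : Int)) none ∈ pvMediaExts :=
        (PySem.Set.contains_iff _ _).mp hB
      have hmem2 : PySem.Str.slice (PySem.Str.lower s) (some (k : Int)) none ∈ pvAllExts :=
        (pvMem_media_iff_all _).mp ((PySem.Set.mem_ofList _ _).mp hmem)
      refine ⟨_, hmem2, ?_⟩
      rw [PySem.Str.toList_slice, PySem.Chars.slice_eq_listSlice, PySem.Str.toList_lower,
        PySem.List.slice_from_natCast]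
      exact List.drop_suffix k l
  · rintro ⟨e, he, hsuf⟩
    obtain ⟨t, het, hdot⟩ := pvExt_shape e he
    obtain ⟨p, hp⟩ := hsuf
    rw [het] at hp
    have hr : PySem.Chars.rfind l ['.'] = (p.length : Int) := by
      rw [← hp]; exact pvRfind_concat p t hdot
    rw [hr]
    have hne : ((p.length : Int) != -1) = true := by simp [bne_iff_ne]
    rw [hne, if_pos rfl]
    have hslice : PySem.Str.slice (PySem.Str.lower s) (some (p.length : Int)) none = e := by
      rw [← String.toList_inj, PySem.Str.toList_slice, PySem.Chars.slice_eq_listSlice,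
        PySem.Str.toList_lower, PySem.List.slice_from_natCast, ← hl, ← hp, het]
      exact pvDrop_append p ('.' :: t) p.length le_rfl |>.trans (by simp)
    rw [hslice]
    exact (PySem.Set.contains_iff _ _).mpr
      ((PySem.Set.mem_ofList _ _).mpr ((pvMem_media_iff_all e).mpr he))

-- ===== VERDICT (by name: the statement is the Claim_ definition above) =====
theorem is_image_audio_video_spec : Claim_equal_is_image_audio_video := by
  intro s _
  unfold Spec_is_image_audio_video
  have h := (pvA_iff s).trans (pvB_iff s).symm
  cases hA : is_image_audio_video s <;> cases hB : is_image_audio_video_alt s <;> simp_all
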